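-- pv_equiv track=rewrite | github.com/wherby/code | hard/bruteforce/q1655.1.py | canDistribute
-- ===== SOURCE A (Python) =====
-- from functools import lru_cache
-- from collections import Counter
--
-- def canDistribute(nums, quantity):
--     m = len(quantity)
--     quantity.sort()
--
--     @lru_cache
--     def dp(con,i):
--         if i ==-1:
--             return True
--
--         if quantity[i] > con[0]:
--             return False
--
--         for j in range(len(con)):
--             if con[j] >= quantity[i]:
--                 new_con = list(con)
--                 new_con[j] -= quantity[i]
--                 new_con.sort(reverse=True)
--
--                 if dp(tuple(new_con),i-1):
--                     return True
--             else:
--                 break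
--         return False
--     return dp(tuple(t for _, t in Counter(nums).most_common(m)),m-1)
-- ===== SOURCE B (Python) =====
-- from collections import Counter
--
--
-- def canDistribute(nums, quantity):
--     # Supplies: the counts of the min(len(quantity), #distinct) most frequent
--     # values, largest first.  Open orders: the positive quantities, largest
--     # first (a nonpositive order needs nothing from the stock).
--     counts = sorted(Counter(nums).values(), reverse=True)[:len(quantity)]
--     needs = sorted((q for q in quantity if q > 0), reverse=True)
--
--     def collect(st, room, kept, out):
--         # Add to `out` every remainder of `st` after removing from it a
--         # sub-multiset whose sum is at most `room`.
--         if not st: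
--             out.add(tuple(kept))
--             return
--         x = st[0]
--         if x <= room:
--             collect(st[1:], room - x, kept, out)      # serve one copy of x
--         k = 1
--         while k < len(st) and st[k] == x:
--             k += 1
--         collect(st[k:], room, kept + st[:k], out)     # serve no copy of x
--
--     # Frontier DP over the supplies: the set of order-multisets that can be
--     # left open after the supplies handled so far.
--     states = {tuple(needs)}
--     for c in counts:
--         new = set()
--         for st in states:
--             if st and st[0] > c:
--                 continue  # largest open order exceeds every remaining supply
--             collect(list(st), c, [], new)
--         states = new
--     return () in states
-- ===== Notes on version B (the rewrite author's own statement) =====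
-- stated objective: alternative
-- what changed: Replaces A's memoized top-down search that assigns customers one at a time to a re-sorted tuple of remaining counts with an iterative frontier DP over the supply counts: for each count it computes the set of order-multisets that can remain open (enumerating sub-multisets by value groups, deduplicating states in a set, and dropping states whose largest order exceeds every remaining count), succeeding iff the empty multiset is reachable; nonpositive orders are served for free.
import Mathlib
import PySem

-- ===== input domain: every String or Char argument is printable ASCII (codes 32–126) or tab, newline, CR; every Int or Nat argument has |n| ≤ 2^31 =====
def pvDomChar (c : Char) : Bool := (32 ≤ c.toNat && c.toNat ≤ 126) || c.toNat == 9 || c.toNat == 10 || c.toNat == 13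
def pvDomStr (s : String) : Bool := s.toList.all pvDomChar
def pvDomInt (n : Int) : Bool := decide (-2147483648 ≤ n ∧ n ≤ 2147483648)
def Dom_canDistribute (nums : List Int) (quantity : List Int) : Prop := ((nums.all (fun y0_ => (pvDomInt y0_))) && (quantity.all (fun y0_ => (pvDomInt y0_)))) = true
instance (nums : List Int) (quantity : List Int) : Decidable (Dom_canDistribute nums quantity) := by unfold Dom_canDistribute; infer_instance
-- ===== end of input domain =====

-- B replaces A's memoized top-down assignment search with an iterative frontier DP over the
-- supply counts (objective: alternative; A additionally sorts `quantity` in place — the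
-- equivalence proved here is about the return value only).

-- ===== PORT A =====
-- A's dp(con, i) recurses on i down to -1; here the fuel n stands for i + 1 (n = 0 is i = -1),
-- so dp(con, m-1) is dpA q m con.  lru_cache is pure memoization and does not change the value.
mutual
def dpA (q : List Int) (n : Nat) (con : List Int) : Bool :=
  match n with
  | 0 => true
  | Nat.succ n' =>
    -- if quantity[i] > con[0]: return False
    if PySem.List.pyGetD con 0 0 < PySem.List.pyGetD q (n' : Int) 0 then false
    else loopA q n' con 0
termination_by (n, 0, 0)

-- the `for j in range(len(con))` loop with its break
def loopA (q : List Int) (n' : Nat) (con : List Int) (j : Nat) : Bool :=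
  if _h : j < con.length then
    if PySem.List.pyGetD q (n' : Int) 0 ≤ PySem.List.pyGetD con (j : Int) 0 then
      (if dpA q n' (PySem.List.sorted
            (con.set j (PySem.List.pyGetD con (j : Int) 0 - PySem.List.pyGetD q (n' : Int) 0))
            (fun x => x) true) = true
       then true
       else loopA q n' con (j + 1))
    else false   -- break
  else false
termination_by (n', 1, con.length - j)
end

def canDistribute (nums : List Int) (quantity : List Int) : Bool :=
  let m := quantity.length
  let q := PySem.List.sorted quantity (fun x => x) false   -- quantity.sort()
  -- Counter(nums).most_common(m) = sorted(counter.items(), key=count, reverse=True)[:m]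
  -- (the documented heapq.nlargest equivalence); then tuple(t for _, t in ...)
  let con := ((PySem.List.sorted (PySem.Dict.counter nums).items (fun p => p.2) true).take m).map
      (fun p => p.2)
  dpA q m con

-- ===== PORT B =====
-- add to `out` every remainder of `st` after removing a sub-multiset with sum ≤ room
def collectB : List Int → Int → List Int → PySem.Set (List Int) → PySem.Set (List Int)
  | [], _, kept, out => PySem.Set.add out kept
  | x :: tl, room, kept, out =>
    let out1 := if x ≤ room then collectB tl (room - x) kept out else out
    let grp := x :: tl.takeWhile (fun y => y == x)        -- the k-scan over equal copies
    collectB (tl.drop (tl.takeWhile (fun y => y == x)).length) room (kept ++ grp) out1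
termination_by st => st.length
decreasing_by all_goals (simp only [List.length_cons, List.length_drop]; omega)

def stepB (c : Int) (states : PySem.Set (List Int)) : PySem.Set (List Int) :=
  states.foldl (fun new st =>
    match st with
    | [] => collectB [] c [] new
    | s0 :: _ => if c < s0 then new else collectB st c [] new) PySem.Set.empty

def canDistribute_alt (nums : List Int) (quantity : List Int) : Bool :=
  let counts := (PySem.List.sorted (PySem.Dict.counter nums).values (fun x => x) true).take
      quantity.length
  let needs := PySem.List.sorted (quantity.filter (fun q => decide (0 < q))) (fun x => x) true
  let states := counts.foldl (fun states c => stepB c states) (PySem.Set.add PySem.Set.empty needs)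
  PySem.Set.contains states []

-- ===== PRECONDITION & SPEC =====
-- Pre_ excludes exactly the inputs where A raises: nums = [] with quantity ≠ [] indexes con[0]
-- of the empty count tuple (IndexError).
def Pre_canDistribute (nums : List Int) (quantity : List Int) : Prop :=
  nums ≠ [] ∨ quantity = []
instance (nums : List Int) (quantity : List Int) : Decidable (Pre_canDistribute nums quantity) := by
  unfold Pre_canDistribute; infer_instance

def pvWitness_canDistribute : List Int × List Int := ([1, 1, 2], [2, 1])

def Spec_canDistribute (nums : List Int) (quantity : List Int) (out : Bool) : Prop :=
  out = canDistribute_alt nums quantity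
instance (nums : List Int) (quantity : List Int) (out : Bool) :
    Decidable (Spec_canDistribute nums quantity out) := by
  unfold Spec_canDistribute; infer_instance

-- ===== CLAIM (what is proved, stated in full; the proofs are below) =====
def Claim_equal_canDistribute : Prop := ∀ (nums : List Int) (quantity : List Int),
  Dom_canDistribute nums quantity → Pre_canDistribute nums quantity →
  Spec_canDistribute nums quantity (canDistribute nums quantity)

-- ===== LEMMAS AND PROOFS =====

/-- `clampI x` is the demand an order of `x` units places on a supply: `x` if positive, else 0. -/
def clampI (x : Int) : Int := if 0 < x then x else 0

lemma clampI_nonneg (x : Int) : 0 ≤ clampI x := by unfold clampI; split <;> omega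

/-- `Serves caps needs`: `needs` can be split among the supplies `caps`
(one labelled part per supply, each part's sum within its supply). -/
def Serves (caps : Multiset Int) (needs : Multiset Int) : Prop :=
  ∃ parts : Multiset (Int × Multiset Int),
    parts.map Prod.fst = caps ∧ (parts.map Prod.snd).sum = needs ∧ ∀ p ∈ parts, p.2.sum ≤ p.1

lemma mem_msum {S : Multiset (Multiset Int)} {a : Int} : a ∈ S.sum ↔ ∃ s ∈ S, a ∈ s := by
  induction S using Multiset.induction_on with
  | empty => simp
  | cons s S ih => simp [Multiset.sum_cons, Multiset.mem_add, ih, or_and_right, exists_or]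

lemma serves_zero_iff (M : Multiset Int) : Serves M 0 ↔ ∀ c ∈ M, 0 ≤ c := by
  constructor
  · rintro ⟨parts, hf, hs, hb⟩ c hc
    rw [← hf] at hc
    obtain ⟨p, hp, rfl⟩ := Multiset.mem_map.mp hc
    have h2 : p.2 ∈ parts.map Prod.snd := Multiset.mem_map_of_mem _ hp
    have hz : p.2 = 0 := Multiset.sum_eq_zero_iff.mp hs _ h2
    have hbp := hb p hp
    rw [hz] at hbp; simpa using hbp
  · intro h
    refine ⟨M.map (fun c => (c, (0 : Multiset Int))), ?_, ?_, ?_⟩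
    · rw [Multiset.map_map]; simp
    · rw [Multiset.map_map]; simp
    · intro p hp
      obtain ⟨c, hc, rfl⟩ := Multiset.mem_map.mp hp
      simpa using h c hc

lemma serves_zero_caps (N : Multiset Int) : Serves 0 N ↔ N = 0 := by
  constructor
  · rintro ⟨parts, hf, hs, -⟩
    have hp0 : parts = 0 := by simpa [Multiset.map_eq_zero] using hf
    subst hp0; simpa using hs.symm
  · rintro rfl; exact ⟨0, by simp, by simp, by simp⟩

lemma serves_of_allzero (M N : Multiset Int) (hN : ∀ y ∈ N, y = 0)
    (hM : ∀ c ∈ M, 0 ≤ c) (hne : M ≠ 0) : Serves M N := by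
  obtain ⟨c, hc⟩ := Multiset.exists_mem_of_ne_zero hne
  refine ⟨(c, N) ::ₘ (M.erase c).map (fun d => (d, (0 : Multiset Int))), ?_, ?_, ?_⟩
  · rw [Multiset.map_cons, Multiset.map_map]
    simpa using Multiset.cons_erase hc
  · rw [Multiset.map_cons, Multiset.map_map]
    simp
  · intro p hp
    rcases Multiset.mem_cons.mp hp with rfl | hp
    · simpa [Multiset.sum_eq_zero hN] using hM c hc
    · obtain ⟨d, hd, rfl⟩ := Multiset.mem_map.mp hp
      simpa using hM d (Multiset.mem_of_mem_erase hd)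

lemma serves_M_ne_zero {M N : Multiset Int} (h : Serves M N) (hN : N ≠ 0) : M ≠ 0 := by
  rcases h with ⟨parts, hf, hs, -⟩
  rintro rfl
  rw [Multiset.map_eq_zero] at hf
  subst hf
  simp at hs
  exact hN hs.symm

lemma serves_cons_cap (c : Int) (M N : Multiset Int) :
    Serves (c ::ₘ M) N ↔ ∃ T, T ≤ N ∧ T.sum ≤ c ∧ Serves M (N - T) := by
  constructor
  · rintro ⟨parts, hf, hs, hb⟩
    obtain ⟨p, hp, hp1, hrest⟩ := (Multiset.map_eq_cons _ _ _ _).mpr hf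
    have hparts : parts = p ::ₘ parts.erase p := (Multiset.cons_erase hp).symm
    rw [hparts, Multiset.map_cons, Multiset.sum_cons] at hs
    refine ⟨p.2, ?_, ?_, ?_⟩
    · rw [← hs]; exact Multiset.le_add_right _ _
    · rw [← hp1]; exact hb p hp
    · have hNT : N - p.2 = ((parts.erase p).map Prod.snd).sum := by
        rw [← hs, add_tsub_cancel_left]
      rw [hNT]
      exact ⟨parts.erase p, hrest, rfl, fun r hr => hb r (Multiset.mem_of_mem_erase hr)⟩
  · rintro ⟨T, hTN, hTc, ⟨Q, hfQ, hsQ, hbQ⟩⟩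
    refine ⟨(c, T) ::ₘ Q, ?_, ?_, ?_⟩
    · rw [Multiset.map_cons, hfQ]
    · rw [Multiset.map_cons, Multiset.sum_cons, hsQ]
      exact add_tsub_cancel_of_le hTN
    · intro p hp
      rcases Multiset.mem_cons.mp hp with rfl | hp
      · exact hTc
      · exact hbQ p hp

lemma serves_mem_le {M N : Multiset Int} (h : Serves M N) (hN : ∀ y ∈ N, 0 ≤ y) {x : Int}
    (hx : x ∈ N) : ∃ cap ∈ M, x ≤ cap := by
  rcases h with ⟨parts, hf, hs, hb⟩
  rw [← hs] at hx
  obtain ⟨s, hsmem, hxs⟩ := mem_msum.mp hx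
  obtain ⟨p, hp, rfl⟩ := Multiset.mem_map.mp hsmem
  refine ⟨p.1, by rw [← hf]; exact Multiset.mem_map_of_mem _ hp, ?_⟩
  have hsplit : p.2 = x ::ₘ p.2.erase x := (Multiset.cons_erase hxs).symm
  have hnn : 0 ≤ (p.2.erase x).sum := by
    apply Multiset.sum_nonneg
    intro y hy
    apply hN
    rw [← hs]
    exact mem_msum.mpr ⟨p.2, hsmem, Multiset.mem_of_mem_erase hy⟩
  have hbp := hb p hp
  rw [hsplit, Multiset.sum_cons] at hbp
  omega

lemma serves_step (M N : Multiset Int) (x : Int) (hM : ∀ c ∈ M, 0 ≤ c)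
    (hN : ∀ y ∈ N, 0 ≤ y) (hNx : x ≤ 0 → ∀ y ∈ N, y = 0) :
    Serves M (clampI x ::ₘ N) ↔ ∃ c ∈ M, x ≤ c ∧ Serves ((c - x) ::ₘ M.erase c) N := by
  by_cases hx : 0 < x
  · rw [clampI, if_pos hx]
    constructor
    · rintro ⟨parts, hf, hs, hb⟩
      have hxmem : x ∈ (parts.map Prod.snd).sum := by
        rw [hs]; exact Multiset.mem_cons_self _ _
      obtain ⟨s, hsmem, hxs⟩ := mem_msum.mp hxmem
      obtain ⟨p, hp, rfl⟩ := Multiset.mem_map.mp hsmem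
      have hc : p.1 ∈ M := by rw [← hf]; exact Multiset.mem_map_of_mem _ hp
      have hparts : parts = p ::ₘ parts.erase p := (Multiset.cons_erase hp).symm
      have hp2 : p.2 = x ::ₘ p.2.erase x := (Multiset.cons_erase hxs).symm
      rw [hparts, Multiset.map_cons, Multiset.sum_cons] at hs
      rw [hp2, Multiset.cons_add, Multiset.cons_inj_right] at hs
      have hbp := hb p hp
      rw [hp2, Multiset.sum_cons] at hbp
      have hRnn : 0 ≤ (p.2.erase x).sum := by
        apply Multiset.sum_nonneg
        intro y hy
        have hyN : y ∈ N := by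
          rw [← hs]; exact Multiset.mem_add.mpr (Or.inl hy)
        exact hN y hyN
      have hfQ : (parts.erase p).map Prod.fst = M.erase p.1 := by
        rw [hparts, Multiset.map_cons] at hf
        rw [← hf, Multiset.erase_cons_head]
      refine ⟨p.1, hc, by omega, ⟨(p.1 - x, p.2.erase x) ::ₘ parts.erase p, ?_, ?_, ?_⟩⟩
      · rw [Multiset.map_cons, hfQ]
      · rw [Multiset.map_cons, Multiset.sum_cons]; exact hs
      · intro r hr
        rcases Multiset.mem_cons.mp hr with rfl | hr
        · simp only
          omega
        · exact hb r (Multiset.mem_of_mem_erase hr)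
    · rintro ⟨c, hc, hxc, ⟨Q, hfQ, hsQ, hbQ⟩⟩
      obtain ⟨r, hr, hr1, hrest⟩ := (Multiset.map_eq_cons _ _ _ _).mpr hfQ
      have hQ : Q = r ::ₘ Q.erase r := (Multiset.cons_erase hr).symm
      refine ⟨(c, x ::ₘ r.2) ::ₘ Q.erase r, ?_, ?_, ?_⟩
      · rw [Multiset.map_cons]
        show c ::ₘ (Q.erase r).map Prod.fst = M
        rw [hrest, Multiset.cons_erase hc]
      · rw [Multiset.map_cons, Multiset.sum_cons, Multiset.cons_add]
        rw [hQ, Multiset.map_cons, Multiset.sum_cons] at hsQ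
        rw [hsQ]
      · intro p hp
        rcases Multiset.mem_cons.mp hp with rfl | hp
        · have hbr := hbQ r hr
          rw [hr1] at hbr
          simp only [Multiset.sum_cons]
          omega
        · exact hbQ _ (Multiset.mem_of_mem_erase hp)
  · rw [clampI, if_neg hx]
    have hxle : x ≤ 0 := by omega
    have hN0 := hNx hxle
    constructor
    · intro h
      have hMne : M ≠ 0 := serves_M_ne_zero h (Multiset.cons_ne_zero)
      obtain ⟨c, hc⟩ := Multiset.exists_mem_of_ne_zero hMne
      refine ⟨c, hc, by have := hM c hc; omega, ?_⟩
      apply serves_of_allzero _ _ hN0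
      · intro d hd
        rcases Multiset.mem_cons.mp hd with rfl | hd
        · have := hM c hc; omega
        · exact hM d (Multiset.mem_of_mem_erase hd)
      · exact Multiset.cons_ne_zero
    · rintro ⟨c, hc, -, -⟩
      apply serves_of_allzero
      · intro y hy
        rcases Multiset.mem_cons.mp hy with rfl | hy
        · rfl
        · exact hN0 y hy
      · exact hM
      · rintro rfl; simp at hc

lemma serves_cons_zero {M N : Multiset Int} (hne : M ≠ 0) :
    Serves M ((0 : Int) ::ₘ N) ↔ Serves M N := by
  constructor
  · rintro ⟨parts, hf, hs, hb⟩
    have h0 : (0 : Int) ∈ (parts.map Prod.snd).sum := by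
      rw [hs]; exact Multiset.mem_cons_self _ _
    obtain ⟨s, hsmem, h0s⟩ := mem_msum.mp h0
    obtain ⟨p, hp, rfl⟩ := Multiset.mem_map.mp hsmem
    have hparts : parts = p ::ₘ parts.erase p := (Multiset.cons_erase hp).symm
    have hp2 : p.2 = (0 : Int) ::ₘ p.2.erase 0 := (Multiset.cons_erase h0s).symm
    rw [hparts, Multiset.map_cons, Multiset.sum_cons, hp2, Multiset.cons_add,
      Multiset.cons_inj_right] at hs
    refine ⟨(p.1, p.2.erase 0) ::ₘ parts.erase p, ?_, ?_, ?_⟩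
    · rw [hparts, Multiset.map_cons] at hf
      rw [Multiset.map_cons]; exact hf
    · rw [Multiset.map_cons, Multiset.sum_cons]; exact hs
    · intro r hr
      rcases Multiset.mem_cons.mp hr with rfl | hr
      · have hbp := hb p hp
        rw [hp2, Multiset.sum_cons] at hbp
        simpa using hbp
      · exact hb r (Multiset.mem_of_mem_erase hr)
  · rintro ⟨parts, hf, hs, hb⟩
    have hpne : parts ≠ 0 := by
      rintro rfl
      exact hne (by simpa using hf.symm)
    obtain ⟨p, hp⟩ := Multiset.exists_mem_of_ne_zero hpne
    have hparts : parts = p ::ₘ parts.erase p := (Multiset.cons_erase hp).symm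
    refine ⟨(p.1, (0 : Int) ::ₘ p.2) ::ₘ parts.erase p, ?_, ?_, ?_⟩
    · rw [hparts, Multiset.map_cons] at hf
      rw [Multiset.map_cons]; exact hf
    · rw [Multiset.map_cons, Multiset.sum_cons, Multiset.cons_add]
      rw [hparts, Multiset.map_cons, Multiset.sum_cons] at hs
      rw [hs]
    · intro r hr
      rcases Multiset.mem_cons.mp hr with rfl | hr
      · simpa using hb p hp
      · exact hb r (Multiset.mem_of_mem_erase hr)

lemma serves_replicate_zero (z : Nat) {M N : Multiset Int} (hne : M ≠ 0) :
    Serves M (Multiset.replicate z (0 : Int) + N) ↔ Serves M N := by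
  induction z with
  | zero => simp
  | succ z ih =>
    rw [Multiset.replicate_succ, Multiset.cons_add, serves_cons_zero hne]
    exact ih

lemma coe_set_eq (l : List Int) (j : Nat) (v : Int) (h : j < l.length) :
    ((l.set j v : List Int) : Multiset Int) = v ::ₘ ((l : Multiset Int).erase l[j]) := by
  induction l generalizing j with
  | nil => simp at h
  | cons a t ih =>
    cases j with
    | zero =>
      show ((v :: t : List Int) : Multiset Int) = v ::ₘ ((a :: t : List Int) : Multiset Int).erase a
      rw [← Multiset.cons_coe, ← Multiset.cons_coe, Multiset.erase_cons_head]
    | succ j =>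
      have hj : j < t.length := by simpa using h
      have hgt : (a :: t)[j + 1] = t[j] := by simp
      rw [hgt]
      show ((a :: t.set j v : List Int) : Multiset Int) = _
      rw [← Multiset.cons_coe, ih j hj, Multiset.cons_swap]
      congr 1
      by_cases hat : t[j] = a
      · rw [← Multiset.cons_coe, hat, Multiset.erase_cons_head]
        have hmem : a ∈ t := hat ▸ List.getElem_mem hj
        exact (Multiset.cons_erase (Multiset.mem_coe.mpr hmem)).symm ▸ rfl
      · rw [← Multiset.cons_coe, Multiset.erase_cons_tail]
        simp [Ne.symm hat]

lemma loopA_iff (q : List Int) (n' : Nat) (con : List Int)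
    (hcon : con.Pairwise (fun a b => b ≤ a)) :
    ∀ (j : Nat), loopA q n' con j = true ↔ ∃ (jj : Nat) (h : jj < con.length), j ≤ jj ∧
      PySem.List.pyGetD q (n' : Int) 0 ≤ con[jj] ∧
      dpA q n' (PySem.List.sorted (con.set jj (con[jj] - PySem.List.pyGetD q (n' : Int) 0))
        (fun x => x) true) = true := by
  suffices H : ∀ (k j : Nat), con.length - j = k → (loopA q n' con j = true ↔
      ∃ (jj : Nat) (h : jj < con.length), j ≤ jj ∧
      PySem.List.pyGetD q (n' : Int) 0 ≤ con[jj] ∧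
      dpA q n' (PySem.List.sorted (con.set jj (con[jj] - PySem.List.pyGetD q (n' : Int) 0))
        (fun x => x) true) = true) by
    intro j; exact H _ j rfl
  intro k
  induction k with
  | zero =>
    intro j hj
    have hnlt : ¬ j < con.length := by omega
    rw [loopA, dif_neg hnlt]
    simp only [Bool.false_eq_true, false_iff]
    rintro ⟨jj, hjj, hjle, -, -⟩
    omega
  | succ k ih =>
    intro j hj
    have hjlen : j < con.length := by omega
    rw [loopA, dif_pos hjlen]
    have hget : PySem.List.pyGetD con (j : Int) 0 = con[j] := by
      rw [PySem.List.pyGetD_natCast]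
      exact List.getD_eq_getElem con 0 hjlen
    rw [hget]
    by_cases hcmp : PySem.List.pyGetD q (n' : Int) 0 ≤ con[j]
    · rw [if_pos hcmp]
      by_cases hdp : dpA q n' (PySem.List.sorted
          (con.set j (con[j] - PySem.List.pyGetD q (n' : Int) 0)) (fun x => x) true) = true
      · rw [if_pos hdp]
        exact iff_of_true rfl ⟨j, hjlen, le_refl j, hcmp, hdp⟩
      · rw [if_neg hdp]
        rw [ih (j + 1) (by omega)]
        constructor
        · rintro ⟨jj, hl, hge, hc2, hd2⟩
          exact ⟨jj, hl, by omega, hc2, hd2⟩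
        · rintro ⟨jj, hl, hge, hc2, hd2⟩
          rcases Nat.eq_or_lt_of_le hge with heq | hlt
          · subst heq; exact absurd hd2 hdp
          · exact ⟨jj, hl, by omega, hc2, hd2⟩
    · rw [if_neg hcmp]
      simp only [Bool.false_eq_true, false_iff]
      rintro ⟨jj, hl, hge, hc2, -⟩
      apply hcmp
      rcases Nat.eq_or_lt_of_le hge with heq | hlt
      · subst heq; exact hc2
      · have hmono : con[jj] ≤ con[j] :=
          (List.pairwise_iff_getElem.mp hcon) j jj hjlen hl hlt
        exact le_trans hc2 hmono

lemma dpA_succ_iff (q : List Int) (n' : Nat) (con : List Int)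
    (hcon : con.Pairwise (fun a b => b ≤ a)) :
    dpA q (n' + 1) con = true ↔ ∃ (jj : Nat) (h : jj < con.length),
      PySem.List.pyGetD q (n' : Int) 0 ≤ con[jj] ∧
      dpA q n' (PySem.List.sorted (con.set jj (con[jj] - PySem.List.pyGetD q (n' : Int) 0))
        (fun x => x) true) = true := by
  rw [dpA]
  cases con with
  | nil =>
    have hl0 : loopA q n' [] 0 = false := by
      rw [loopA]
      simp
    rw [hl0]
    constructor
    · intro h
      split at h <;> simp_all
    · rintro ⟨jj, hl, -, -⟩
      simp at hl
  | cons c0 t =>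
    rw [PySem.List.pyGetD_zero_cons]
    by_cases hg : c0 < PySem.List.pyGetD q (n' : Int) 0
    · rw [if_pos hg]
      simp only [Bool.false_eq_true, false_iff]
      rintro ⟨jj, hl, hc2, -⟩
      have hle : (c0 :: t)[jj] ≤ c0 := by
        cases jj with
        | zero => simp
        | succ jj =>
          have := (List.pairwise_iff_getElem.mp hcon) 0 (jj + 1) (by simp) hl (by omega)
          simpa using this
      omega
    · rw [if_neg hg]
      rw [loopA_iff q n' (c0 :: t) hcon 0]
      constructor
      · rintro ⟨jj, hl, -, h1, h2⟩
        exact ⟨jj, hl, h1, h2⟩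
      · rintro ⟨jj, hl, h1, h2⟩
        exact ⟨jj, hl, Nat.zero_le _, h1, h2⟩

lemma dpA_iff_serves (q : List Int) (hq : q.Pairwise (fun a b => a ≤ b)) :
    ∀ (n : Nat) (con : List Int), n ≤ q.length → (∀ c ∈ con, 0 ≤ c) →
    con.Pairwise (fun a b => b ≤ a) →
    (dpA q n con = true ↔
      Serves (con : Multiset Int) (((q.take n).map clampI : List Int) : Multiset Int)) := by
  intro n
  induction n with
  | zero =>
    intro con _ hc _
    have h0 : dpA q 0 con = true := by rw [dpA]
    simp only [h0, List.take_zero, List.map_nil]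
    rw [show ((([] : List Int) : Multiset Int)) = 0 from rfl, serves_zero_iff]
    exact iff_of_true (by trivial) (fun c hcm => hc c (Multiset.mem_coe.mp hcm))
  | succ n' ih =>
    intro con hn hc hcon
    have hn' : n' < q.length := by omega
    have hqv : PySem.List.pyGetD q (n' : Int) 0 = q[n'] := by
      rw [PySem.List.pyGetD_natCast]
      exact List.getD_eq_getElem q 0 hn'
    rw [dpA_succ_iff q n' con hcon]
    have htake : (q.take (n' + 1)).map clampI = (q.take n').map clampI ++ [clampI q[n']] := by
      rw [List.take_add_one, List.getElem?_eq_getElem hn']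
      simp only [Option.toList_some, List.map_append, List.map_cons, List.map_nil]
    rw [htake]
    have hco : (((q.take n').map clampI ++ [clampI q[n']] : List Int) : Multiset Int)
        = clampI q[n'] ::ₘ (((q.take n').map clampI : List Int) : Multiset Int) := by
      rw [Multiset.cons_coe, Multiset.coe_eq_coe]
      exact (List.perm_append_singleton _ _)
    rw [hco]
    have hNnn : ∀ y ∈ (((q.take n').map clampI : List Int) : Multiset Int), 0 ≤ y := by
      intro y hy
      obtain ⟨u, -, rfl⟩ := List.mem_map.mp (Multiset.mem_coe.mp hy)
      exact clampI_nonneg u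
    have hNx : q[n'] ≤ 0 → ∀ y ∈ (((q.take n').map clampI : List Int) : Multiset Int), y = 0 := by
      intro hle y hy
      obtain ⟨u, hu, rfl⟩ := List.mem_map.mp (Multiset.mem_coe.mp hy)
      obtain ⟨i, hi, rfl⟩ := List.mem_iff_getElem.mp hu
      have hilen : i < n' := by
        have := hi
        simp only [List.length_take] at this
        omega
      have hgte : (q.take n')[i] = q[i] := List.getElem_take
      have hmono : q[i] ≤ q[n'] :=
        (List.pairwise_iff_getElem.mp hq) i n' (by omega) hn' hilen
      rw [hgte]
      unfold clampI
      rw [if_neg (by omega)]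
    rw [serves_step (con : Multiset Int) _ q[n'] (fun c hcm => hc c (Multiset.mem_coe.mp hcm))
      hNnn hNx]
    constructor
    · rintro ⟨jj, hl, hle, hdp⟩
      rw [hqv] at hle hdp
      have hnn2 : ∀ d ∈ PySem.List.sorted (con.set jj (con[jj] - q[n'])) (fun x => x) true,
          0 ≤ d := by
        intro d hd
        have hd2 := (PySem.List.mem_sorted _ _ _ _).mp hd
        rcases List.mem_or_eq_of_mem_set hd2 with hd3 | rfl
        · exact hc d hd3
        · omega
      have hpair2 : (PySem.List.sorted (con.set jj (con[jj] - q[n'])) (fun x => x)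
          true).Pairwise (fun a b => b ≤ a) := by
        simpa using PySem.List.sorted_pairwise_rev (con.set jj (con[jj] - q[n'])) (fun x => x)
      have hserves := (ih _ (by omega) hnn2 hpair2).mp hdp
      have hcoe : ((PySem.List.sorted (con.set jj (con[jj] - q[n'])) (fun x => x) true :
          List Int) : Multiset Int) = ((con.set jj (con[jj] - q[n']) : List Int) : Multiset Int) :=
        Multiset.coe_eq_coe.mpr (PySem.List.sorted_perm _ _ _)
      rw [hcoe, coe_set_eq con jj _ hl] at hserves
      exact ⟨con[jj], Multiset.mem_coe.mpr (List.getElem_mem hl), hle, hserves⟩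
    · rintro ⟨c, hcm, hle, hS⟩
      obtain ⟨jj, hl, rfl⟩ := List.mem_iff_getElem.mp (Multiset.mem_coe.mp hcm)
      refine ⟨jj, hl, by rw [hqv]; exact hle, ?_⟩
      rw [hqv]
      have hnn2 : ∀ d ∈ PySem.List.sorted (con.set jj (con[jj] - q[n'])) (fun x => x) true,
          0 ≤ d := by
        intro d hd
        have hd2 := (PySem.List.mem_sorted _ _ _ _).mp hd
        rcases List.mem_or_eq_of_mem_set hd2 with hd3 | rfl
        · exact hc d hd3
        · omega
      have hpair2 : (PySem.List.sorted (con.set jj (con[jj] - q[n'])) (fun x => x)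
          true).Pairwise (fun a b => b ≤ a) := by
        simpa using PySem.List.sorted_pairwise_rev (con.set jj (con[jj] - q[n'])) (fun x => x)
      apply (ih _ (by omega) hnn2 hpair2).mpr
      have hcoe : ((PySem.List.sorted (con.set jj (con[jj] - q[n'])) (fun x => x) true :
          List Int) : Multiset Int) = ((con.set jj (con[jj] - q[n']) : List Int) : Multiset Int) :=
        Multiset.coe_eq_coe.mpr (PySem.List.sorted_perm _ _ _)
      rw [hcoe, coe_set_eq con jj _ hl]
      exact hS

-- ---- B side ----

/-- The prune test of `stepB`: the state's largest open order fits the current supply. -/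
def aliveB (c : Int) : List Int → Prop
  | [] => True
  | s0 :: _ => s0 ≤ c

lemma takeWhile_len_le (p : Int → Bool) (tl : List Int) :
    (tl.takeWhile p).length ≤ tl.length :=
  (List.takeWhile_prefix p).length_le

lemma grp_take (x : Int) (tl : List Int) :
    tl.takeWhile (fun y => y == x) = tl.take (tl.takeWhile (fun y => y == x)).length :=
  List.prefix_iff_eq_take.mp (List.takeWhile_prefix _)

lemma grp_split (x : Int) (tl : List Int) :
    x :: tl = (x :: tl.takeWhile (fun y => y == x)) ++
      tl.drop (tl.takeWhile (fun y => y == x)).length := by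
  have h := List.take_append_drop (tl.takeWhile (fun y => y == x)).length tl
  conv_lhs => rw [← h]
  rw [← grp_take]
  simp

lemma grp_mem (x : Int) (tl : List Int) :
    ∀ y ∈ (x :: tl.takeWhile (fun y => y == x)), y = x := by
  intro y hy
  rcases List.mem_cons.mp hy with rfl | hy
  · rfl
  · simpa using List.mem_takeWhile_imp hy

lemma grp_coe (x : Int) (tl : List Int) :
    ((x :: tl : List Int) : Multiset Int) =
      ((x :: tl.takeWhile (fun y => y == x) : List Int) : Multiset Int) +
      ((tl.drop (tl.takeWhile (fun y => y == x)).length : List Int) : Multiset Int) := by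
  rw [Multiset.coe_add]
  exact congrArg _ (grp_split x tl)

lemma collectB_nil (room : Int) (kept : List Int) (out : PySem.Set (List Int)) :
    collectB [] room kept out = PySem.Set.add out kept := by
  rw [collectB]

lemma collectB_cons (x : Int) (tl : List Int) (room : Int) (kept : List Int)
    (out : PySem.Set (List Int)) :
    collectB (x :: tl) room kept out =
      collectB (tl.drop (tl.takeWhile (fun y => y == x)).length) room
        (kept ++ (x :: tl.takeWhile (fun y => y == x)))
        (if x ≤ room then collectB tl (room - x) kept out else out) := by
  rw [collectB]

lemma collectB_mono_aux : ∀ (N : Nat) (st : List Int), st.length ≤ N →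
    ∀ (room : Int) (kept : List Int) (out : PySem.Set (List Int)) (y : List Int),
    y ∈ out → y ∈ collectB st room kept out := by
  intro N
  induction N with
  | zero =>
    intro st hst room kept out y hy
    have : st = [] := List.length_eq_zero_iff.mp (by omega)
    subst this
    rw [collectB_nil]
    exact ((PySem.Set.mem_add _ _ _).mpr (Or.inl hy))
  | succ N ihN =>
    intro st hst room kept out y hy
    cases st with
    | nil =>
      rw [collectB_nil]
      exact ((PySem.Set.mem_add _ _ _).mpr (Or.inl hy))
    | cons x tl =>
      rw [collectB_cons]
      apply ihN
      · have h := takeWhile_len_le (fun y => y == x) tl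
        simp only [List.length_drop]
        simp only [List.length_cons] at hst
        omega
      · by_cases hxr : x ≤ room
        · rw [if_pos hxr]
          apply ihN tl (by simp only [List.length_cons] at hst; omega)
          exact hy
        · rw [if_neg hxr]; exact hy

lemma collectB_mono {st : List Int} {room : Int} {kept : List Int}
    {out : PySem.Set (List Int)} {y : List Int} (hy : y ∈ out) :
    y ∈ collectB st room kept out :=
  collectB_mono_aux st.length st le_rfl room kept out y hy

lemma collectB_sound_aux : ∀ (N : Nat) (st : List Int), st.length ≤ N →
    ∀ (room : Int) (kept : List Int) (out : PySem.Set (List Int)) (y : List Int),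
    (∀ z ∈ st, 0 ≤ z) → 0 ≤ room →
    y ∈ collectB st room kept out → y ∈ out ∨ ∃ T : Multiset Int, T ≤ (st : Multiset Int) ∧
      T.sum ≤ room ∧ (y : Multiset Int) = (kept : Multiset Int) + ((st : Multiset Int) - T) := by
  intro N
  induction N with
  | zero =>
    intro st hst room kept out y hnn hroom hy
    have : st = [] := List.length_eq_zero_iff.mp (by omega)
    subst this
    rw [collectB_nil] at hy
    rcases (PySem.Set.mem_add _ _ _).mp hy with h | h
    · exact Or.inl h
    · exact Or.inr ⟨0, by simp, by simpa using hroom, by simp [h]⟩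
  | succ N ihN =>
    intro st hst room kept out y hnn hroom hy
    cases st with
    | nil =>
      rw [collectB_nil] at hy
      rcases (PySem.Set.mem_add _ _ _).mp hy with h | h
      · exact Or.inl h
      · exact Or.inr ⟨0, by simp, by simpa using hroom, by simp [h]⟩
    | cons x tl =>
      rw [collectB_cons] at hy
      have hklen : (tl.drop (tl.takeWhile (fun y => y == x)).length).length ≤ N := by
        have h := takeWhile_len_le (fun y => y == x) tl
        simp only [List.length_drop]
        simp only [List.length_cons] at hst
        omega
      have hdropnn : ∀ z ∈ tl.drop (tl.takeWhile (fun y => y == x)).length, 0 ≤ z := by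
        intro z hz
        exact hnn z (List.mem_cons_of_mem x ((List.drop_sublist _ _).subset hz))
      rcases ihN _ hklen room _ _ y hdropnn hroom hy with h1 | ⟨T, hT, hTsum, hyeq⟩
      · -- y came from out1
        by_cases hxr : x ≤ room
        · rw [if_pos hxr] at h1
          have htlnn : ∀ z ∈ tl, 0 ≤ z := fun z hz => hnn z (List.mem_cons_of_mem x hz)
          rcases ihN tl (by simp only [List.length_cons] at hst; omega) (room - x) kept out y
              htlnn (by omega) h1 with h2 | ⟨T', hT', hT'sum, hyeq'⟩
          · exact Or.inl h2
          · refine Or.inr ⟨x ::ₘ T', ?_, ?_, ?_⟩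
            · rw [← Multiset.cons_coe]
              exact Multiset.cons_le_cons x hT'
            · rw [Multiset.sum_cons]
              omega
            · rw [← Multiset.cons_coe, Multiset.sub_cons, Multiset.erase_cons_head]
              exact hyeq'
        · rw [if_neg hxr] at h1
          exact Or.inl h1
      · -- y is kept ++ grp plus remainder of the drop
        refine Or.inr ⟨T, ?_, hTsum, ?_⟩
        · rw [grp_coe]
          calc T ≤ _ := hT
          _ ≤ _ := Multiset.le_add_left _ _
        · rw [hyeq, grp_coe, ← Multiset.coe_add,
            add_tsub_assoc_of_le hT, add_assoc]
  -- end

lemma collectB_sound {st : List Int} {room : Int} {kept : List Int}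
    {out : PySem.Set (List Int)} {y : List Int}
    (hnn : ∀ z ∈ st, 0 ≤ z) (hroom : 0 ≤ room) (hy : y ∈ collectB st room kept out) :
    y ∈ out ∨ ∃ T : Multiset Int, T ≤ (st : Multiset Int) ∧
      T.sum ≤ room ∧ (y : Multiset Int) = (kept : Multiset Int) + ((st : Multiset Int) - T) :=
  collectB_sound_aux st.length st le_rfl room kept out y hnn hroom hy

lemma collectB_complete_aux : ∀ (N : Nat) (st : List Int), st.length ≤ N →
    ∀ (room : Int) (kept : List Int) (out : PySem.Set (List Int)) (T : Multiset Int),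
    st.Pairwise (fun a b => b ≤ a) → (∀ z ∈ st, 0 ≤ z) → 0 ≤ room →
    T ≤ (st : Multiset Int) → T.sum ≤ room →
    ∃ y ∈ collectB st room kept out,
      (y : Multiset Int) = (kept : Multiset Int) + ((st : Multiset Int) - T) := by
  intro N
  induction N with
  | zero =>
    intro st hst room kept out T _ _ _ hT _
    have : st = [] := List.length_eq_zero_iff.mp (by omega)
    subst this
    have hT0 : T = 0 := Multiset.le_zero.mp hT
    subst hT0
    exact ⟨kept, by rw [collectB_nil]; exact (PySem.Set.mem_add _ _ _).mpr (Or.inr rfl),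
      by simp⟩
  | succ N ihN =>
    intro st hst room kept out T hsort hnn hroom hT hTsum
    cases st with
    | nil =>
      have hT0 : T = 0 := Multiset.le_zero.mp hT
      subst hT0
      exact ⟨kept, by rw [collectB_nil]; exact (PySem.Set.mem_add _ _ _).mpr (Or.inr rfl),
        by simp⟩
    | cons x tl =>
      have htllen : tl.length ≤ N := by simp only [List.length_cons] at hst; omega
      have hklen : (tl.drop (tl.takeWhile (fun y => y == x)).length).length ≤ N := by
        have h := takeWhile_len_le (fun y => y == x) tl
        simp only [List.length_drop]
        omega
      have htlnn : ∀ z ∈ tl, 0 ≤ z := fun z hz => hnn z (List.mem_cons_of_mem x hz)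
      by_cases hxT : x ∈ T
      · -- take one copy of x
        set T' := T.erase x with hT'def
        have hTsplit : T = x ::ₘ T' := (Multiset.cons_erase hxT).symm
        have hT'le : T' ≤ (tl : Multiset Int) := by
          have h1 := Multiset.erase_le_erase x hT
          rw [← Multiset.cons_coe, Multiset.erase_cons_head] at h1
          exact h1
        have hT'nn : 0 ≤ T'.sum := by
          apply Multiset.sum_nonneg
          intro z hz
          have hz2 : z ∈ (tl : Multiset Int) := Multiset.mem_of_le hT'le hz
          exact htlnn z (Multiset.mem_coe.mp hz2)
        have hxsum : x + T'.sum ≤ room := by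
          rw [hTsplit, Multiset.sum_cons] at hTsum
          exact hTsum
        have hxr : x ≤ room := by omega
        obtain ⟨y, hy, hyv⟩ := ihN tl htllen (room - x) kept out T'
          (List.Pairwise.of_cons hsort) htlnn (by omega) hT'le (by omega)
        refine ⟨y, ?_, ?_⟩
        · rw [collectB_cons]
          apply collectB_mono
          rw [if_pos hxr]
          exact hy
        · rw [hyv, hTsplit, ← Multiset.cons_coe, Multiset.sub_cons, Multiset.erase_cons_head]
      · -- skip the whole group of copies of x
        have hTdrop : T ≤ ((tl.drop (tl.takeWhile (fun y => y == x)).length : List Int) :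
            Multiset Int) := by
          rw [Multiset.le_iff_count]
          intro a
          by_cases hax : a = x
          · subst hax
            rw [Multiset.count_eq_zero.mpr hxT]
            exact Nat.zero_le _
          · have h1 := Multiset.le_iff_count.mp hT a
            rw [grp_coe, Multiset.count_add] at h1
            have h2 : Multiset.count a ((x :: tl.takeWhile (fun y => y == x) : List Int) :
                Multiset Int) = 0 := by
              rw [Multiset.count_eq_zero]
              intro hmem
              exact hax (grp_mem x tl a (Multiset.mem_coe.mp hmem))
            omega
        have hdropsort : (tl.drop (tl.takeWhile (fun y => y == x)).length).Pairwise
            (fun a b => b ≤ a) :=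
          List.Pairwise.sublist (List.drop_sublist _ _) (List.Pairwise.of_cons hsort)
        have hdropnn : ∀ z ∈ tl.drop (tl.takeWhile (fun y => y == x)).length, 0 ≤ z :=
          fun z hz => htlnn z ((List.drop_sublist _ _).subset hz)
        obtain ⟨y, hy, hyv⟩ := ihN _ hklen room
          (kept ++ (x :: tl.takeWhile (fun y => y == x)))
          (if x ≤ room then collectB tl (room - x) kept out else out) T
          hdropsort hdropnn hroom hTdrop hTsum
        refine ⟨y, by rw [collectB_cons]; exact hy, ?_⟩
        rw [hyv, grp_coe, ← Multiset.coe_add, add_tsub_assoc_of_le hTdrop, add_assoc]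

lemma collectB_complete {st : List Int} {room : Int} (kept : List Int)
    (out : PySem.Set (List Int)) {T : Multiset Int}
    (hsort : st.Pairwise (fun a b => b ≤ a)) (hnn : ∀ z ∈ st, 0 ≤ z) (hroom : 0 ≤ room)
    (hT : T ≤ (st : Multiset Int)) (hTsum : T.sum ≤ room) :
    ∃ y ∈ collectB st room kept out,
      (y : Multiset Int) = (kept : Multiset Int) + ((st : Multiset Int) - T) :=
  collectB_complete_aux st.length st le_rfl room kept out T hsort hnn hroom hT hTsum

lemma collectB_shape_aux : ∀ (N : Nat) (st : List Int), st.length ≤ N →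
    ∀ (room : Int) (kept : List Int) (out : PySem.Set (List Int)) (y : List Int),
    y ∈ collectB st room kept out →
    y ∈ out ∨ ∃ s : List Int, s.Sublist st ∧ y = kept ++ s := by
  intro N
  induction N with
  | zero =>
    intro st hst room kept out y hy
    have : st = [] := List.length_eq_zero_iff.mp (by omega)
    subst this
    rw [collectB_nil] at hy
    rcases (PySem.Set.mem_add _ _ _).mp hy with h | h
    · exact Or.inl h
    · exact Or.inr ⟨[], List.nil_sublist _, by simp [h]⟩
  | succ N ihN =>
    intro st hst room kept out y hy
    cases st with
    | nil =>
      rw [collectB_nil] at hy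
      rcases (PySem.Set.mem_add _ _ _).mp hy with h | h
      · exact Or.inl h
      · exact Or.inr ⟨[], List.nil_sublist _, by simp [h]⟩
    | cons x tl =>
      rw [collectB_cons] at hy
      have hklen : (tl.drop (tl.takeWhile (fun y => y == x)).length).length ≤ N := by
        have h := takeWhile_len_le (fun y => y == x) tl
        simp only [List.length_drop]
        simp only [List.length_cons] at hst
        omega
      rcases ihN _ hklen room _ _ y hy with h1 | ⟨s, hs, rfl⟩
      · by_cases hxr : x ≤ room
        · rw [if_pos hxr] at h1
          rcases ihN tl (by simp only [List.length_cons] at hst; omega) (room - x) kept out y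
              h1 with h2 | ⟨s, hs, rfl⟩
          · exact Or.inl h2
          · exact Or.inr ⟨s, hs.trans (List.sublist_cons_self x tl), rfl⟩
        · rw [if_neg hxr] at h1
          exact Or.inl h1
      · refine Or.inr ⟨(x :: tl.takeWhile (fun y => y == x)) ++ s, ?_, by rw [List.append_assoc]⟩
        conv_rhs => rw [grp_split x tl]
        exact List.Sublist.append_left hs _

lemma collectB_shape {st : List Int} {room : Int} {kept : List Int}
    {out : PySem.Set (List Int)} {y : List Int} (hy : y ∈ collectB st room kept out) :
    y ∈ out ∨ ∃ s : List Int, s.Sublist st ∧ y = kept ++ s :=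
  collectB_shape_aux st.length st le_rfl room kept out y hy

lemma stepB_unfold (c : Int) (states : PySem.Set (List Int)) :
    stepB c states = states.foldl (fun new st =>
      match st with
      | [] => collectB [] c [] new
      | s0 :: _ => if c < s0 then new else collectB st c [] new) PySem.Set.empty := rfl

lemma stepB_fold_mono (c : Int) : ∀ (l : List (List Int)) (out : PySem.Set (List Int))
    (y : List Int), y ∈ out → y ∈ l.foldl (fun new st =>
      match st with
      | [] => collectB [] c [] new
      | s0 :: _ => if c < s0 then new else collectB st c [] new) out := by
  intro l
  induction l with
  | nil => intro out y hy; simpa using hy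
  | cons st l ih =>
    intro out y hy
    rw [List.foldl_cons]
    apply ih
    cases st with
    | nil => exact collectB_mono hy
    | cons s0 t =>
      dsimp only
      by_cases hdead : c < s0
      · rw [if_pos hdead]; exact hy
      · rw [if_neg hdead]
        exact collectB_mono hy

lemma stepB_fold_sound (c : Int) (hc : 0 ≤ c) : ∀ (l : List (List Int))
    (out : PySem.Set (List Int)) (y : List Int),
    (∀ st ∈ l, ∀ z ∈ st, 0 ≤ z) →
    y ∈ l.foldl (fun new st =>
      match st with
      | [] => collectB [] c [] new
      | s0 :: _ => if c < s0 then new else collectB st c [] new) out →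
    y ∈ out ∨ ∃ st ∈ l, aliveB c st ∧ ∃ T : Multiset Int, T ≤ (st : Multiset Int) ∧
      T.sum ≤ c ∧ (y : Multiset Int) = (st : Multiset Int) - T := by
  intro l
  induction l with
  | nil => intro out y _ hy; exact Or.inl (by simpa using hy)
  | cons st l ih =>
    intro out y hl hy
    rw [List.foldl_cons] at hy
    have hlrest : ∀ st ∈ l, ∀ z ∈ st, 0 ≤ z :=
      fun st hst => hl st (List.mem_cons_of_mem _ hst)
    rcases ih _ y hlrest hy with h1 | ⟨st', hst', h2⟩
    · -- y came from the first state's step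
      have hstep : y ∈ out ∨ aliveB c st ∧ ∃ T : Multiset Int, T ≤ (st : Multiset Int) ∧
          T.sum ≤ c ∧ (y : Multiset Int) = (st : Multiset Int) - T := by
        cases st with
        | nil =>
          dsimp only at h1
          rcases collectB_sound (by simp) hc h1 with h | ⟨T, hT, hTs, hyv⟩
          · exact Or.inl h
          · have hT0 : T = 0 := Multiset.le_zero.mp hT
            subst hT0
            exact Or.inr ⟨trivial, 0, by simp, by simpa using hc, by simpa using hyv⟩
        | cons s0 t =>
          dsimp only at h1
          by_cases hdead : c < s0
          · rw [if_pos hdead] at h1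
            exact Or.inl h1
          · rw [if_neg hdead] at h1
            rcases collectB_sound (hl _ (List.mem_cons_self)) hc h1 with h | ⟨T, hT, hTs, hyv⟩
            · exact Or.inl h
            · exact Or.inr ⟨by simpa [aliveB] using not_lt.mp hdead, T, hT, hTs,
                by simpa using hyv⟩
      rcases hstep with h | ⟨ha, hT⟩
      · exact Or.inl h
      · exact Or.inr ⟨st, List.mem_cons_self, ha, hT⟩
    · exact Or.inr ⟨st', List.mem_cons_of_mem _ hst', h2⟩

lemma stepB_fold_complete (c : Int) (hc : 0 ≤ c) : ∀ (l : List (List Int))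
    (out : PySem.Set (List Int)) (st : List Int), st ∈ l →
    st.Pairwise (fun a b => b ≤ a) → (∀ z ∈ st, 0 ≤ z) → aliveB c st →
    ∀ (T : Multiset Int), T ≤ (st : Multiset Int) → T.sum ≤ c →
    ∃ y : List Int, y ∈ l.foldl (fun new st =>
      match st with
      | [] => collectB [] c [] new
      | s0 :: _ => if c < s0 then new else collectB st c [] new) out ∧
      ((y : List Int) : Multiset Int) = (st : Multiset Int) - T := by
  intro l
  induction l with
  | nil => intro out st hst; exact absurd hst (List.not_mem_nil)
  | cons s l ih =>
    intro out st hst hsort hnn halive T hT hTsum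
    rw [List.foldl_cons]
    rcases List.mem_cons.mp hst with rfl | hst'
    · -- st is folded right now
      have hmem : ∃ y : List Int, y ∈ (match st with
          | [] => collectB [] c [] out
          | s0 :: _ => if c < s0 then out else collectB st c [] out) ∧
          ((y : List Int) : Multiset Int) = (st : Multiset Int) - T := by
        cases st with
        | nil =>
          obtain ⟨y, hy, hyv⟩ := collectB_complete [] out hsort hnn hc hT hTsum
          exact ⟨y, hy, by simpa using hyv⟩
        | cons s0 t =>
          have hs0 : s0 ≤ c := halive
          dsimp only
          rw [if_neg (by omega)]
          obtain ⟨y, hy, hyv⟩ := collectB_complete [] out hsort hnn hc hT hTsum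
          exact ⟨y, hy, by simpa using hyv⟩
      obtain ⟨y, hy, hyv⟩ := hmem
      exact ⟨y, stepB_fold_mono c l _ y hy, hyv⟩
    · exact ih _ st hst' hsort hnn halive T hT hTsum

lemma stepB_members {c : Int} {states : PySem.Set (List Int)} {y : List Int}
    (hy : y ∈ stepB c states) : ∃ st ∈ states, y.Sublist st := by
  rw [stepB_unfold] at hy
  suffices H : ∀ (l : List (List Int)) (out : PySem.Set (List Int)) (y : List Int),
      y ∈ l.foldl (fun new st =>
        match st with
        | [] => collectB [] c [] new
        | s0 :: _ => if c < s0 then new else collectB st c [] new) out →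
      y ∈ out ∨ ∃ st ∈ l, y.Sublist st by
    rcases H states PySem.Set.empty y hy with h | h
    · exact absurd h (by simp [PySem.Set.empty])
    · exact h
  intro l
  induction l with
  | nil => intro out y hy2; exact Or.inl (by simpa using hy2)
  | cons st l ih =>
    intro out y hy2
    rw [List.foldl_cons] at hy2
    rcases ih _ y hy2 with h1 | ⟨st', hst', hsub⟩
    · have : y ∈ out ∨ ∃ s : List Int, s.Sublist st ∧ y = s := by
        cases st with
        | nil =>
          dsimp only at h1
          rcases collectB_shape h1 with h | ⟨s, hs, hyeq⟩
          · exact Or.inl h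
          · exact Or.inr ⟨s, hs, by simpa using hyeq⟩
        | cons s0 t =>
          dsimp only at h1
          by_cases hdead : c < s0
          · rw [if_pos hdead] at h1
            exact Or.inl h1
          · rw [if_neg hdead] at h1
            rcases collectB_shape h1 with h | ⟨s, hs, hyeq⟩
            · exact Or.inl h
            · exact Or.inr ⟨s, hs, by simpa using hyeq⟩
      rcases this with h | ⟨s, hs, rfl⟩
      · exact Or.inl h
      · exact Or.inr ⟨st, List.mem_cons_self, hs⟩
    · exact Or.inr ⟨st', List.mem_cons_of_mem _ hst', hsub⟩

lemma loop_iff : ∀ (caps : List Int), caps.Pairwise (fun a b => b ≤ a) →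
    (∀ c ∈ caps, 0 ≤ c) →
    ∀ (states : PySem.Set (List Int)),
      (∀ st ∈ states, st.Pairwise (fun a b => b ≤ a) ∧ ∀ z ∈ st, 0 ≤ z) →
      (([] : List Int) ∈ caps.foldl (fun s c => stepB c s) states ↔
        ∃ st ∈ states, Serves (caps : Multiset Int) (st : Multiset Int)) := by
  intro caps
  induction caps with
  | nil =>
    intro _ _ states _
    simp only [List.foldl_nil]
    constructor
    · intro h
      exact ⟨[], h, (serves_zero_caps 0).mpr rfl⟩
    · rintro ⟨st, hst, hS⟩
      have h0 : (st : Multiset Int) = 0 := (serves_zero_caps _).mp hS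
      have : st = [] := by simpa [Multiset.coe_eq_zero] using h0
      subst this
      exact hst
  | cons c caps' ih =>
    intro hcaps hcnn states hstates
    simp only [List.foldl_cons]
    have hc0 : 0 ≤ c := hcnn c List.mem_cons_self
    have hccaps' : ∀ d ∈ caps', d ≤ c := (List.pairwise_cons.mp hcaps).1
    have hcaps'p : caps'.Pairwise (fun a b => b ≤ a) := (List.pairwise_cons.mp hcaps).2
    have hcnn' : ∀ d ∈ caps', 0 ≤ d := fun d hd => hcnn d (List.mem_cons_of_mem _ hd)
    have hstates' : ∀ st ∈ stepB c states,
        st.Pairwise (fun a b => b ≤ a) ∧ ∀ z ∈ st, 0 ≤ z := by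
      intro st hst
      obtain ⟨st0, hst0, hsub⟩ := stepB_members hst
      obtain ⟨hp, hn⟩ := hstates st0 hst0
      exact ⟨List.Pairwise.sublist hsub hp, fun z hz => hn z (hsub.subset hz)⟩
    rw [ih hcaps'p hcnn' (stepB c states) hstates']
    have hcoecons : ((c :: caps' : List Int) : Multiset Int) = c ::ₘ (caps' : Multiset Int) :=
      (Multiset.cons_coe _ _).symm
    constructor
    · rintro ⟨st', hst', hS⟩
      rw [stepB_unfold] at hst'
      rcases stepB_fold_sound c hc0 states PySem.Set.empty st'
          (fun st hst => (hstates st hst).2) hst' with h | ⟨st, hstmem, halive, T, hT, hTs, hyeq⟩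
      · exact absurd h (by simp [PySem.Set.empty])
      · refine ⟨st, hstmem, ?_⟩
        rw [hcoecons, serves_cons_cap]
        exact ⟨T, hT, hTs, by rw [← hyeq]; exact hS⟩
    · rintro ⟨st, hstmem, hS⟩
      have hSkeep := hS
      rw [hcoecons, serves_cons_cap] at hS
      obtain ⟨T, hTN, hTsum, hS'⟩ := hS
      have hstfacts := hstates st hstmem
      have halive : aliveB c st := by
        cases st with
        | nil => trivial
        | cons s0 t =>
          show s0 ≤ c
          have hs0mem : s0 ∈ ((s0 :: t : List Int) : Multiset Int) := by
            rw [← Multiset.cons_coe]; exact Multiset.mem_cons_self _ _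
          obtain ⟨cap, hcap, hlecap⟩ := serves_mem_le hSkeep
            (fun y hy => (hstfacts.2) y (Multiset.mem_coe.mp hy)) hs0mem
          rw [hcoecons] at hcap
          rcases Multiset.mem_cons.mp hcap with rfl | hcap'
          · exact hlecap
          · exact le_trans hlecap (hccaps' cap (Multiset.mem_coe.mp hcap'))
      obtain ⟨y, hy, hyv⟩ := stepB_fold_complete c hc0 states PySem.Set.empty st hstmem
        hstfacts.1 hstfacts.2 halive T hTN hTsum
      refine ⟨y, by rw [stepB_unfold]; exact hy, ?_⟩
      rw [hyv]
      exact hS'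

lemma clamp_split (l : List Int) :
    ((l.map clampI : List Int) : Multiset Int) =
      Multiset.replicate (l.countP (fun x => decide (x ≤ 0))) (0 : Int) +
      ((l.filter (fun x => decide (0 < x)) : List Int) : Multiset Int) := by
  induction l with
  | nil => simp
  | cons x t ih =>
    by_cases hx : 0 < x
    · have hcl : clampI x = x := by unfold clampI; rw [if_pos hx]
      have hcp : (x :: t).countP (fun x => decide (x ≤ 0)) =
          t.countP (fun x => decide (x ≤ 0)) := by
        rw [List.countP_cons, if_neg (by simpa using hx)]
        omega
      rw [List.map_cons, List.filter_cons, if_pos (by simpa using hx), hcl, hcp]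
      rw [← Multiset.cons_coe, ← Multiset.cons_coe, ih]
      rw [← Multiset.singleton_add, ← Multiset.singleton_add]
      exact add_left_comm _ _ _
    · have hcl : clampI x = 0 := by unfold clampI; rw [if_neg hx]
      have hcp : (x :: t).countP (fun x => decide (x ≤ 0)) =
          t.countP (fun x => decide (x ≤ 0)) + 1 := by
        rw [List.countP_cons, if_pos (by simp; omega)]
      rw [List.map_cons, List.filter_cons, if_neg (by simpa using hx), hcl, hcp]
      rw [← Multiset.cons_coe, ih, Multiset.replicate_succ, Multiset.cons_add]

lemma counter_values_pos (nums : List Int) :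
    ∀ v ∈ (PySem.Dict.counter nums).values, 0 < v := by
  intro v hv
  have hv2 : v ∈ (PySem.Dict.counter nums).items.map (fun p => p.2) := hv
  rw [PySem.Dict.items_counter, List.map_map] at hv2
  obtain ⟨k, hk, hkv⟩ := List.mem_map.mp hv2
  have hkin : k ∈ nums := (PySem.Set.mem_ofList _ _).mp hk
  have hcp : 0 < List.count k nums := List.count_pos_iff.mpr hkin
  rw [← hkv]
  simpa using hcp

lemma counts_lists_eq (nums : List Int) (m : Nat) :
    ((PySem.List.sorted (PySem.Dict.counter nums).items (fun p => p.2) true).take m).map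
        (fun p => p.2) =
      (PySem.List.sorted (PySem.Dict.counter nums).values (fun x => x) true).take m := by
  rw [List.map_take]
  congr 1
  refine List.eq_of_perm_of_sorted (le := fun (a b : Int) => b ≤ a)
    (fun a b _ _ h1 h2 => le_antisymm h2 h1) ?_ ?_ ?_
  · exact List.Pairwise.map _ (fun a b h => h)
      (PySem.List.sorted_pairwise_rev (PySem.Dict.counter nums).items (fun p => p.2))
  · simpa using PySem.List.sorted_pairwise_rev (PySem.Dict.counter nums).values (fun x => x)
  · have h1 : ((PySem.List.sorted (PySem.Dict.counter nums).items (fun p => p.2) true).map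
        (fun p => p.2)).Perm ((PySem.Dict.counter nums).items.map (fun p => p.2)) :=
      (PySem.List.sorted_perm _ _ _).map _
    have h2 : (PySem.List.sorted (PySem.Dict.counter nums).values (fun x => x) true).Perm
        (PySem.Dict.counter nums).values := PySem.List.sorted_perm _ _ _
    have hv : (PySem.Dict.counter nums).values =
        (PySem.Dict.counter nums).items.map (fun p => p.2) := rfl
    rw [hv] at h2
    exact h1.trans h2.symm

lemma main_eq (nums quantity : List Int) (hpre : Pre_canDistribute nums quantity) :
    canDistribute nums quantity = canDistribute_alt nums quantity := by
  by_cases hq0 : quantity = []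
  · subst hq0
    have hA : canDistribute nums [] = true := by
      simp only [canDistribute, List.length_nil]
      rw [dpA]
    have hB : canDistribute_alt nums [] = true := by
      simp only [canDistribute_alt, List.length_nil, List.take_zero, List.filter_nil,
        List.foldl_nil]
      rfl
    rw [hA, hB]
  · have hnums : nums ≠ [] := by
      rcases hpre with h | h
      · exact h
      · exact absurd h hq0
    simp only [canDistribute, canDistribute_alt]
    rw [counts_lists_eq nums quantity.length]
    have hlenq : (PySem.List.sorted quantity (fun x => x) false).length = quantity.length :=
      PySem.List.length_sorted _ _ _
    have hqpair : (PySem.List.sorted quantity (fun x => x) false).Pairwise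
        (fun a b => a ≤ b) := by
      simpa using PySem.List.sorted_pairwise quantity (fun x => x)
    have hvpos : ∀ v ∈ PySem.List.sorted (PySem.Dict.counter nums).values (fun x => x) true,
        0 < v := by
      intro v hv
      exact counter_values_pos nums v ((PySem.List.mem_sorted _ _ _ _).mp hv)
    have hcnn : ∀ v ∈ (PySem.List.sorted (PySem.Dict.counter nums).values (fun x => x)
        true).take quantity.length, 0 ≤ v :=
      fun v hv => le_of_lt (hvpos v (List.mem_of_mem_take hv))
    have hcpair : ((PySem.List.sorted (PySem.Dict.counter nums).values (fun x => x)
        true).take quantity.length).Pairwise (fun a b => b ≤ a) := by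
      have h := PySem.List.sorted_pairwise_rev (PySem.Dict.counter nums).values (fun x => x)
      exact List.Pairwise.sublist (List.take_sublist _ _) (by simpa using h)
    have hcne : (PySem.List.sorted (PySem.Dict.counter nums).values (fun x => x)
        true).take quantity.length ≠ [] := by
      intro hnil
      rcases List.take_eq_nil_iff.mp hnil with h | h
      · exact hq0 (List.eq_nil_of_length_eq_zero h)
      · rw [PySem.List.sorted_eq_nil_iff] at h
        apply hnums
        have hmap : (PySem.Dict.counter nums).items.map (fun p => p.2) = [] := h
        rw [PySem.Dict.items_counter, List.map_map] at hmap
        have hof : PySem.Set.ofList nums = [] := List.map_eq_nil_iff.mp hmap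
        cases hn : nums with
        | nil => rfl
        | cons a t =>
          exfalso
          have ham : a ∈ PySem.Set.ofList nums :=
            (PySem.Set.mem_ofList _ _).mpr (by rw [hn]; exact List.mem_cons_self)
          rw [hof] at ham
          simp at ham
    have hMne : (((PySem.List.sorted (PySem.Dict.counter nums).values (fun x => x)
        true).take quantity.length : List Int) : Multiset Int) ≠ 0 := by
      simpa [Multiset.coe_eq_zero] using hcne
    have hA := dpA_iff_serves (PySem.List.sorted quantity (fun x => x) false) hqpair
      quantity.length
      ((PySem.List.sorted (PySem.Dict.counter nums).values (fun x => x) true).take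
        quantity.length)
      (by rw [hlenq]) hcnn hcpair
    have htakeq : (PySem.List.sorted quantity (fun x => x) false).take quantity.length =
        PySem.List.sorted quantity (fun x => x) false := by
      rw [← hlenq, List.take_length]
    rw [htakeq] at hA
    have hperm1 : (((PySem.List.sorted quantity (fun x => x) false).map clampI : List Int) :
        Multiset Int) = ((quantity.map clampI : List Int) : Multiset Int) :=
      Multiset.coe_eq_coe.mpr (List.Perm.map _ (PySem.List.sorted_perm _ _ _))
    rw [hperm1, clamp_split quantity, serves_replicate_zero _ hMne] at hA
    have hstates : ∀ st ∈ PySem.Set.add PySem.Set.empty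
        (PySem.List.sorted (quantity.filter (fun q => decide (0 < q))) (fun x => x) true),
        st.Pairwise (fun a b => b ≤ a) ∧ ∀ z ∈ st, 0 ≤ z := by
      intro st hst
      have hsteq : st = PySem.List.sorted (quantity.filter (fun q => decide (0 < q)))
          (fun x => x) true := by
        rcases (PySem.Set.mem_add _ _ _).mp hst with h | h
        · exact absurd h (by simp [PySem.Set.empty])
        · exact h
      subst hsteq
      constructor
      · have h := PySem.List.sorted_pairwise_rev
          (quantity.filter (fun q => decide (0 < q))) (fun x => x)
        simpa using h
      · intro z hz
        have hz2 := (PySem.List.mem_sorted _ _ _ _).mp hz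
        have hz3 := (List.mem_filter.mp hz2).2
        simp at hz3
        omega
    have hB := loop_iff
      ((PySem.List.sorted (PySem.Dict.counter nums).values (fun x => x) true).take
        quantity.length)
      hcpair hcnn
      (PySem.Set.add PySem.Set.empty
        (PySem.List.sorted (quantity.filter (fun q => decide (0 < q))) (fun x => x) true))
      hstates
    have hBex : (∃ st ∈ PySem.Set.add PySem.Set.empty
        (PySem.List.sorted (quantity.filter (fun q => decide (0 < q))) (fun x => x) true),
        Serves (((PySem.List.sorted (PySem.Dict.counter nums).values (fun x => x) true).take
          quantity.length : List Int) : Multiset Int) (st : Multiset Int)) ↔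
        Serves (((PySem.List.sorted (PySem.Dict.counter nums).values (fun x => x) true).take
          quantity.length : List Int) : Multiset Int)
          ((quantity.filter (fun q => decide (0 < q)) : List Int) : Multiset Int) := by
      constructor
      · rintro ⟨st, hst, hS⟩
        have hsteq : st = PySem.List.sorted (quantity.filter (fun q => decide (0 < q)))
            (fun x => x) true := by
          rcases (PySem.Set.mem_add _ _ _).mp hst with h | h
          · exact absurd h (by simp [PySem.Set.empty])
          · exact h
        subst hsteq
        rwa [Multiset.coe_eq_coe.mpr (PySem.List.sorted_perm _ _ _)] at hS
      · intro hS
        refine ⟨_, (PySem.Set.mem_add _ _ _).mpr (Or.inr rfl), ?_⟩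
        rwa [Multiset.coe_eq_coe.mpr (PySem.List.sorted_perm _ _ _)]
    rw [Bool.eq_iff_iff, hA, PySem.Set.contains_iff, hB, hBex]


-- ===== VERDICT (by name: the statement is the Claim_ definition above) =====
theorem canDistribute_spec : Claim_equal_canDistribute := by
  intro nums quantity _ hpre
  unfold Spec_canDistribute
  exact main_eq nums quantity hpre
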